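-- pv_equiv track=rewrite | github.com/ravix339/ModularRobots | PythonReconfig/logn.py | __backbone_endpoints_horizontal
-- ===== SOURCE A (Python) =====
-- from typing import List
--
-- def __backbone_endpoints_horizontal(structure : List[List[int]]) -> List[int]:
--     cur_indices = [i for i in range(len(structure)) if structure[i][0] == 1]
--     new_indices = []
--     for col in range(1, len(structure[0])):
--         for row_num in range(len(cur_indices)):
--             row = cur_indices[row_num]
--             if structure[row][col] == 1:
--                 new_indices.append(row)
--                 if row_num == 0:
--                     for i in range(row-1, -1, -1):
--                         if structure[i][col] == 1:
--                             new_indices.append(i)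
--                         else:
--                             break
--                 cap = len(structure)
--                 if row_num != len(cur_indices) -1:
--                     cap = cur_indices[row_num+1]
--                 for i in range(row+1, cap):
--                     if structure[i][col] == 1:
--                         new_indices.append(i)
--                     else:
--                         break
--         cur_indices = sorted(new_indices)
--         new_indices = []
--     return cur_indices
-- ===== SOURCE B (Python) =====
-- from typing import List
--
-- def __backbone_endpoints_horizontal(structure : List[List[int]]) -> List[int]:
--     n = len(structure)
--     cur = [i for i in range(n) if structure[i][0] == 1]
--     for col in range(1, len(structure[0])):
--         head = cur[0] if cur else -1
--         active = set(cur)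
--         nxt = []
--         pending = []        # rows of the current run of 1s seen before any active row
--         anchored = False    # current run already contains an emitted active row
--         for r in range(n):
--             if structure[r][col] == 1:
--                 if anchored:
--                     nxt.append(r)
--                 elif r in active:
--                     if r == head:
--                         nxt.extend(pending)
--                     nxt.append(r)
--                     pending = []
--                     anchored = True
--                 else:
--                     pending.append(r)
--             else:
--                 pending = []
--                 anchored = False
--         cur = nxt
--     return cur
-- ===== Notes on version B (the rewrite author's own statement) =====
-- stated objective: alternative
-- what changed: B replaces A's seed-and-extend (iterate over the previous active rows, growing an upward run from the first and capped downward runs from each, then sort) by a single top-to-bottom state-machine scan of each column that partitions it into maximal runs of 1s, using a set of the previous active rows, emitting each run from its first active row (or from the run start when the run contains the minimum active row); the output is built in order so nothing is sorted.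
-- outside the precondition, e.g. on __backbone_endpoints_horizontal([[0, 1], [0]]): A returns [], B raises IndexError
import Mathlib
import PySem

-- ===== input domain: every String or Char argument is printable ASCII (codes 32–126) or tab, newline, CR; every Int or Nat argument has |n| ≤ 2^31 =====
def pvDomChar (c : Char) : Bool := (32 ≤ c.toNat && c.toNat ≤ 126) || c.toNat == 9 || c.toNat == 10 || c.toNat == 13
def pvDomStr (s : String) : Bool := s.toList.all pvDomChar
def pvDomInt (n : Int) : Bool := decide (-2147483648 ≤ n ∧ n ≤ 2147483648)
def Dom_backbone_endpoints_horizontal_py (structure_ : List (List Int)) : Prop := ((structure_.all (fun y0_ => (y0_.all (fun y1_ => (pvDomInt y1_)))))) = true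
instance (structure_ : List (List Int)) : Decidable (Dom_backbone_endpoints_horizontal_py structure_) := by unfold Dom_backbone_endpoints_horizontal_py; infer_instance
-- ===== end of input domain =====

-- B replaces A's seed-and-extend over the previous active rows (plus a per-column sort)
-- by a single top-to-bottom state-machine scan of each column over its maximal runs of
-- 1s, with a set of the previous active rows; same return value.

-- ===== PORT A =====
-- structure[row][col] (both ports read cells the same way; in-range under Pre_)
def pvCell (g : List (List Int)) (r c : Int) : Int :=
  PySem.List.pyGetD (PySem.List.pyGetD g r []) c 0

-- A's inner loop over row_num for one column (appends, then sorts outside)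
def pvStepA (g : List (List Int)) (col : Int) (cur : List Int) : List Int :=
  (PySem.List.pyRange 0 (cur.length : Int) 1).foldl (fun acc row_num =>
    let row := PySem.List.pyGetD cur row_num 0
    if pvCell g row col = 1 then
      let up := if row_num = 0 then
          (PySem.List.pyRange (row - 1) (-1) (-1)).takeWhile (fun i => pvCell g i col == 1)
        else []
      let cap : Int := if row_num ≠ (cur.length : Int) - 1 then PySem.List.pyGetD cur (row_num + 1) 0
        else (g.length : Int)
      let down := (PySem.List.pyRange (row + 1) cap 1).takeWhile (fun i => pvCell g i col == 1)
      acc ++ [row] ++ up ++ down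
    else acc) []

def backbone_endpoints_horizontal_py (structure_ : List (List Int)) : List Int :=
  let cur0 := (PySem.List.pyRange 0 (structure_.length : Int) 1).filter
    (fun i => pvCell structure_ i 0 == 1)
  (PySem.List.pyRange 1 ((PySem.List.pyGetD structure_ 0 []).length : Int) 1).foldl
    (fun cur col => PySem.List.sorted (pvStepA structure_ col cur) (fun x => x) false) cur0

-- ===== PORT B =====
-- B's per-column state-machine scan: state = (nxt, pending, anchored)
def pvScanB (g : List (List Int)) (col : Int) (cur : List Int) : List Int :=
  let head : Int := cur.headD (-1)
  let active : PySem.Set Int := PySem.Set.ofList cur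
  ((PySem.List.pyRange 0 (g.length : Int) 1).foldl
    (fun (st : List Int × List Int × Bool) r =>
      if pvCell g r col = 1 then
        if st.2.2 then (st.1 ++ [r], st.2.1, st.2.2)
        else if PySem.Set.contains active r then
          (if r = head then st.1 ++ st.2.1 ++ [r] else st.1 ++ [r], [], true)
        else (st.1, st.2.1 ++ [r], st.2.2)
      else (st.1, [], false)) ([], [], false)).1

def backbone_endpoints_horizontal_py_alt (structure_ : List (List Int)) : List Int :=
  let cur0 := (PySem.List.pyRange 0 (structure_.length : Int) 1).filter
    (fun i => pvCell structure_ i 0 == 1)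
  (PySem.List.pyRange 1 ((PySem.List.pyGetD structure_ 0 []).length : Int) 1).foldl
    (fun cur col => pvScanB structure_ col cur) cur0

-- ===== PRECONDITION & SPEC =====
-- Pre_ restricts to nonempty grids whose first row is nonempty and whose every row is at
-- least as long as the first row (the natural grid domain): on raggeder inputs A generally
-- raises IndexError, and where it happens to return, which cells get scanned is accidental.
def Pre_backbone_endpoints_horizontal_py (structure_ : List (List Int)) : Prop :=
  structure_ ≠ [] ∧ structure_.headI ≠ [] ∧
    ∀ r ∈ structure_, structure_.headI.length ≤ r.length
instance (structure_ : List (List Int)) : Decidable (Pre_backbone_endpoints_horizontal_py structure_) := by unfold Pre_backbone_endpoints_horizontal_py; infer_instance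

def pvWitness_backbone_endpoints_horizontal_py : List (List Int) := [[1, 0, 1], [1, 1, 1], [0, 1, 0]]

def Spec_backbone_endpoints_horizontal_py (structure_ : List (List Int)) (out : List Int) : Prop := out = backbone_endpoints_horizontal_py_alt structure_
instance (structure_ : List (List Int)) (out : List Int) : Decidable (Spec_backbone_endpoints_horizontal_py structure_ out) := by unfold Spec_backbone_endpoints_horizontal_py; infer_instance

-- ===== CLAIM (what is proved, stated in full; the proofs are below) =====
def Claim_equal_backbone_endpoints_horizontal_py : Prop := ∀ (structure_ : List (List Int)), Dom_backbone_endpoints_horizontal_py structure_ → Pre_backbone_endpoints_horizontal_py structure_ → Spec_backbone_endpoints_horizontal_py structure_ (backbone_endpoints_horizontal_py structure_)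

-- ===== LEMMAS AND PROOFS =====

-- 'all cells a..b of this column are 1'
def pvOnes (g : List (List Int)) (col a b : Int) : Bool :=
  (PySem.List.pyRange a (b + 1) 1).all (fun i => pvCell g i col == 1)

lemma pvOnes_iff (g : List (List Int)) (col a b : Int) :
    pvOnes g col a b = true ↔ ∀ i, a ≤ i → i ≤ b → pvCell g i col = 1 := by
  simp only [pvOnes, List.all_eq_true, PySem.List.mem_pyRange_one, beq_iff_eq]
  constructor
  · intro h i h1 h2; exact h i ⟨h1, by omega⟩
  · intro h i ⟨h1, h2⟩; exact h i h1 (by omega)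

-- the reachability predicate both per-column passes compute
def pvP (g : List (List Int)) (col : Int) (cur : List Int) (x : Int) : Bool :=
  cur.any (fun a => decide (a ≤ x) && pvOnes g col a x) ||
  (match cur with
   | [] => false
   | h :: _ => decide (x ≤ h) && pvOnes g col x h)

-- the canonical value of one column pass: rows 0..n-1 satisfying pvP, in order
def pvCanon (g : List (List Int)) (col : Int) (cur : List Int) : List Int :=
  (PySem.List.pyRange 0 (g.length : Int) 1).filter (pvP g col cur)

-- canonical per-index segments of A's column pass
def pvUpT (g : List (List Int)) (col row : Int) : List Int :=
  (PySem.List.pyRange (row - 1) (-1) (-1)).takeWhile (fun i => pvCell g i col == 1)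

def pvDownT (g : List (List Int)) (col row cap : Int) : List Int :=
  (PySem.List.pyRange (row + 1) cap 1).takeWhile (fun i => pvCell g i col == 1)

def pvCap (g : List (List Int)) (cur : List Int) (j : Int) : Int :=
  if j + 1 < (cur.length : Int) then PySem.List.pyGetD cur (j + 1) 0 else (g.length : Int)

def pvSegA (g : List (List Int)) (col : Int) (cur : List Int) (j : Int) : List Int :=
  let row := PySem.List.pyGetD cur j 0
  if pvCell g row col = 1 then
    [row] ++ (if j = 0 then pvUpT g col row else []) ++ pvDownT g col row (pvCap g cur j)
  else []

-- the same segment rearranged in ascending order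
def pvSegS (g : List (List Int)) (col : Int) (cur : List Int) (j : Int) : List Int :=
  let row := PySem.List.pyGetD cur j 0
  if pvCell g row col = 1 then
    (if j = 0 then (pvUpT g col row).reverse else []) ++ [row] ++
      pvDownT g col row (pvCap g cur j)
  else []

-- membership characterizations of the two takeWhile runs
lemma mem_downT (g : List (List Int)) (col : Int) :
    ∀ (fuel : Nat) (a cap x : Int), (cap - a).toNat = fuel →
      (x ∈ (PySem.List.pyRange a cap 1).takeWhile (fun i => pvCell g i col == 1) ↔
        a ≤ x ∧ x < cap ∧ ∀ i, a ≤ i → i ≤ x → pvCell g i col = 1) := by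
  intro fuel
  induction fuel with
  | zero =>
    intro a cap x h
    rw [PySem.List.pyRange_one_eq_nil (show cap ≤ a by omega)]
    simp only [List.takeWhile_nil, List.not_mem_nil, false_iff]
    omega
  | succ n ih =>
    intro a cap x h
    rw [PySem.List.pyRange_one_cons (show a < cap by omega), List.takeWhile_cons]
    by_cases hc : pvCell g a col = 1
    · simp only [hc, beq_self_eq_true, if_pos, List.mem_cons]
      rw [ih (a + 1) cap x (by omega)]
      constructor
      · rintro (rfl | ⟨h1, h2, h3⟩)
        · exact ⟨le_refl _, by omega, fun i hi1 hi2 => by rw [show i = x by omega]; exact hc⟩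
        · exact ⟨by omega, h2, fun i hi1 hi2 => by
            rcases eq_or_lt_of_le hi1 with rfl | hlt
            · exact hc
            · exact h3 i (by omega) hi2⟩
      · rintro ⟨h1, h2, h3⟩
        rcases eq_or_lt_of_le h1 with rfl | hlt
        · exact Or.inl rfl
        · exact Or.inr ⟨by omega, h2, fun i hi1 hi2 => h3 i (by omega) hi2⟩
    · simp only [beq_iff_eq, hc, if_false, List.not_mem_nil, false_iff]
      intro ⟨h1, h2, h3⟩
      exact hc (h3 a (le_refl _) h1)

lemma mem_upT (g : List (List Int)) (col : Int) :
    ∀ (fuel : Nat) (s x : Int), (s + 1).toNat = fuel → -1 ≤ s →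
      (x ∈ (PySem.List.pyRange s (-1) (-1)).takeWhile (fun i => pvCell g i col == 1) ↔
        0 ≤ x ∧ x ≤ s ∧ ∀ i, x ≤ i → i ≤ s → pvCell g i col = 1) := by
  intro fuel
  induction fuel with
  | zero =>
    intro s x h hs
    rw [PySem.List.pyRange_neg_one_eq_nil (show s ≤ -1 by omega)]
    simp only [List.takeWhile_nil, List.not_mem_nil, false_iff]
    omega
  | succ n ih =>
    intro s x h hs
    rw [PySem.List.pyRange_neg_one_cons (show (-1:Int) < s by omega), List.takeWhile_cons]
    by_cases hc : pvCell g s col = 1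
    · simp only [hc, beq_self_eq_true, if_pos, List.mem_cons]
      rw [ih (s - 1) x (by omega) (by omega)]
      constructor
      · rintro (rfl | ⟨h1, h2, h3⟩)
        · exact ⟨by omega, le_refl _, fun i hi1 hi2 => by rw [show i = x by omega]; exact hc⟩
        · exact ⟨h1, by omega, fun i hi1 hi2 => by
            rcases eq_or_lt_of_le hi2 with rfl | hlt
            · exact hc
            · exact h3 i hi1 (by omega)⟩
      · rintro ⟨h1, h2, h3⟩
        rcases eq_or_lt_of_le h2 with rfl | hlt
        · exact Or.inl rfl
        · exact Or.inr ⟨h1, by omega, fun i hi1 hi2 => h3 i hi1 (by omega)⟩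
    · simp only [beq_iff_eq, hc, if_false, List.not_mem_nil, false_iff]
      intro ⟨h1, h2, h3⟩
      exact hc (h3 s h2 (le_refl _))

lemma mem_downT' (g : List (List Int)) (col row cap x : Int) :
    x ∈ pvDownT g col row cap ↔
      row < x ∧ x < cap ∧ ∀ i, row < i → i ≤ x → pvCell g i col = 1 := by
  rw [pvDownT, mem_downT g col (cap - (row + 1)).toNat (row + 1) cap x rfl]
  constructor
  · rintro ⟨h1, h2, h3⟩; exact ⟨by omega, h2, fun i hi1 hi2 => h3 i (by omega) hi2⟩
  · rintro ⟨h1, h2, h3⟩; exact ⟨by omega, h2, fun i hi1 hi2 => h3 i (by omega) hi2⟩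

lemma mem_upT' (g : List (List Int)) (col row x : Int) (hrow : 0 ≤ row) :
    x ∈ pvUpT g col row ↔
      0 ≤ x ∧ x < row ∧ ∀ i, x ≤ i → i < row → pvCell g i col = 1 := by
  rw [pvUpT, mem_upT g col row.toNat (row - 1) x (by omega) (by omega)]
  constructor
  · rintro ⟨h1, h2, h3⟩; exact ⟨h1, by omega, fun i hi1 hi2 => h3 i hi1 (by omega)⟩
  · rintro ⟨h1, h2, h3⟩; exact ⟨h1, by omega, fun i hi1 hi2 => h3 i hi1 (by omega)⟩

lemma pairwise_flatMap_of {α β : Type} {R : β → β → Prop} (l : List α) (f : α → List β)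
    (h1 : ∀ a ∈ l, (f a).Pairwise R)
    (h2 : l.Pairwise (fun a b => ∀ x ∈ f a, ∀ y ∈ f b, R x y)) :
    (l.flatMap f).Pairwise R := by
  induction l with
  | nil => simp
  | cons a t ih =>
    rw [List.flatMap_cons, List.pairwise_append]
    rw [List.pairwise_cons] at h2
    refine ⟨h1 a (by simp), ih (fun b hb => h1 b (by simp [hb])) h2.2, ?_⟩
    intro x hx y hy
    rcases List.mem_flatMap.mp hy with ⟨b, hb, hyb⟩
    exact h2.1 b hb x hx y hyb

lemma stepA_eq_flatMap (g : List (List Int)) (col : Int) (cur : List Int) :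
    pvStepA g col cur =
      (PySem.List.pyRange 0 (cur.length : Int) 1).flatMap (pvSegA g col cur) := by
  rw [pvStepA, ← List.nil_append ((PySem.List.pyRange 0 (cur.length : Int) 1).flatMap
    (pvSegA g col cur)), ← PySem.List.foldl_append_eq_flatMap]
  apply PySem.List.foldl_congr_mem
  intro acc j hj
  rcases PySem.List.mem_pyRange_one.mp hj with ⟨hj0, hjl⟩
  simp only [pvSegA, pvCap, pvUpT, pvDownT]
  split
  · rcases Decidable.em (j + 1 < (cur.length : Int)) with h | h
    · rw [if_pos (show j ≠ (cur.length : Int) - 1 by omega), if_pos h]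
      simp
    · rw [if_neg (show ¬(j ≠ (cur.length : Int) - 1) by omega), if_neg h]
      simp
  · simp

lemma getD_lt (cur : List Int) (hpw : cur.Pairwise (· < ·)) (i j : Int)
    (h0 : 0 ≤ i) (hij : i < j) (hj : j < (cur.length : Int)) :
    PySem.List.pyGetD cur i 0 < PySem.List.pyGetD cur j 0 := by
  rw [PySem.List.pyGetD_eq_getElem cur 0 h0 (by omega : i < (cur.length : Int)),
    PySem.List.pyGetD_eq_getElem cur 0 (show (0:Int) ≤ j by omega) hj]
  exact (List.pairwise_iff_getElem.mp hpw) i.toNat j.toNat (by omega) (by omega) (by omega)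

lemma getD_mem (cur : List Int) (j : Int) (h0 : 0 ≤ j) (hj : j < (cur.length : Int)) :
    PySem.List.pyGetD cur j 0 ∈ cur := by
  rw [PySem.List.pyGetD_eq_getElem cur 0 h0 hj]
  exact List.getElem_mem _

lemma mem_segS (g : List (List Int)) (col : Int) (cur : List Int)
    (hpw : cur.Pairwise (· < ·))
    (hbd : ∀ x ∈ cur, 0 ≤ x ∧ x < (g.length : Int))
    (j : Int) (hj0 : 0 ≤ j) (hjl : j < (cur.length : Int)) :
    ∀ x ∈ pvSegS g col cur j,
      0 ≤ x ∧ x < pvCap g cur j ∧ (j ≠ 0 → PySem.List.pyGetD cur j 0 ≤ x) := by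
  intro x hx
  obtain ⟨hr0, hrn⟩ := hbd _ (getD_mem cur j hj0 hjl)
  have hrowcap : PySem.List.pyGetD cur j 0 < pvCap g cur j := by
    rw [pvCap]
    split
    · exact getD_lt cur hpw j (j + 1) hj0 (by omega) (by assumption)
    · exact hrn
  simp only [pvSegS] at hx
  split at hx
  · rw [List.append_assoc, List.mem_append, List.mem_append, List.mem_singleton] at hx
    rcases hx with hx | rfl | hx
    · by_cases hj : j = 0
      · rw [if_pos hj, List.mem_reverse] at hx
        rw [mem_upT' g col _ x hr0] at hx
        exact ⟨hx.1, by omega, fun h => absurd hj h⟩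
      · rw [if_neg hj] at hx
        simp at hx
    · exact ⟨hr0, hrowcap, fun _ => le_refl _⟩
    · rw [mem_downT'] at hx
      exact ⟨by omega, hx.2.1, fun _ => by omega⟩
  · simp at hx

lemma pairwise_segS (g : List (List Int)) (col : Int) (cur : List Int) (j : Int)
    (hrow : 0 ≤ PySem.List.pyGetD cur j 0) :
    (pvSegS g col cur j).Pairwise (· < ·) := by
  simp only [pvSegS]
  split
  · have hup : ((pvUpT g col (PySem.List.pyGetD cur j 0)).reverse).Pairwise (· < ·) := by
      have hsub : (pvUpT g col (PySem.List.pyGetD cur j 0)).reverse.Sublist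
          (PySem.List.pyRange 0 (PySem.List.pyGetD cur j 0) 1) := by
        rw [pvUpT, PySem.List.pyRange_neg_one_eq_reverse,
          show PySem.List.pyGetD cur j 0 - 1 + 1 = PySem.List.pyGetD cur j 0 from by ring,
          show (-1 : Int) + 1 = 0 from by ring]
        have := (List.takeWhile_sublist
          (l := (PySem.List.pyRange 0 (PySem.List.pyGetD cur j 0) 1).reverse)
          (p := fun i => pvCell g i col == 1)).reverse
        rw [List.reverse_reverse] at this
        exact this
      exact List.Pairwise.sublist hsub (PySem.List.pairwise_lt_pyRange_one _ _)
    rw [List.append_assoc, List.pairwise_append]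
    refine ⟨?_, ?_, ?_⟩
    · split
      · exact hup
      · exact List.Pairwise.nil
    · rw [List.singleton_append, List.pairwise_cons]
      refine ⟨?_, List.Pairwise.sublist (List.takeWhile_sublist _)
        (PySem.List.pairwise_lt_pyRange_one _ _)⟩
      intro b hb
      rw [pvDownT] at hb
      rw [show List.takeWhile (fun i => pvCell g i col == 1)
          (PySem.List.pyRange (PySem.List.pyGetD cur j 0 + 1) (pvCap g cur j) 1)
          = pvDownT g col (PySem.List.pyGetD cur j 0) (pvCap g cur j) from rfl,
        mem_downT'] at hb
      omega
    · intro a ha b hb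
      split at ha
      · rw [List.mem_reverse, mem_upT' g col _ a hrow] at ha
        rw [List.singleton_append, List.mem_cons] at hb
        rcases hb with rfl | hb
        · omega
        · rw [mem_downT'] at hb
          omega
      · simp at ha
  · exact List.Pairwise.nil

lemma segA_perm_segS (g : List (List Int)) (col : Int) (cur : List Int) (j : Int) :
    (pvSegS g col cur j).Perm (pvSegA g col cur j) := by
  simp only [pvSegA, pvSegS]
  split
  · by_cases hj : j = 0
    · rw [if_pos hj, if_pos hj]
      exact List.Perm.append_right _
        (((List.reverse_perm _).append_right _).trans List.perm_append_comm)
    · rw [if_neg hj, if_neg hj]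
      simp
  · exact List.Perm.refl _

-- x is in A's segment list iff pvP x (and x is a row index)
lemma eq_of_pairwise_lt_of_mem_iff (l1 l2 : List Int)
    (h1 : l1.Pairwise (· < ·)) (h2 : l2.Pairwise (· < ·))
    (hm : ∀ x, x ∈ l1 ↔ x ∈ l2) : l1 = l2 := by
  have hperm : l1.Perm l2 := by
    rw [List.perm_ext_iff_of_nodup (h1.imp ne_of_lt) (h2.imp ne_of_lt)]
    exact hm
  exact List.Perm.eq_of_pairwise (fun a b _ _ hab hba => le_antisymm hab hba)
    (h1.imp le_of_lt) (h2.imp le_of_lt) hperm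

-- the invariant of B's column scan after processing rows [0, r)
def pvPr (g : List (List Int)) (col : Int) (cur : List Int) (r x : Int) : Bool :=
  cur.any (fun a => decide (a ≤ x) && pvOnes g col a x) ||
  (match cur with
   | [] => false
   | h :: _ => decide (h < r) && decide (x ≤ h) && pvOnes g col x h)

def pvInv (g : List (List Int)) (col : Int) (cur : List Int) (r : Int)
    (st : List Int × List Int × Bool) : Prop :=
  st.1 = (PySem.List.pyRange 0 r 1).filter (pvPr g col cur r)
  ∧ (st.2.2 = true → st.2.1 = [] ∧
      ∃ a ∈ cur, a < r ∧ pvOnes g col a (r - 1) = true)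
  ∧ (st.2.2 = false → ∃ s, 0 ≤ s ∧ s ≤ r ∧ st.2.1 = PySem.List.pyRange s r 1 ∧
      pvOnes g col s (r - 1) = true ∧ (s = 0 ∨ pvCell g (s - 1) col ≠ 1) ∧
      ∀ a ∈ cur, ¬(s ≤ a ∧ a < r))

lemma pvOnes_sub (g : List (List Int)) (col a b a' b' : Int)
    (h : pvOnes g col a b = true) (ha : a ≤ a') (hb : b' ≤ b) : pvOnes g col a' b' = true := by
  rw [pvOnes_iff] at *
  intro i h1 h2
  exact h i (by omega) (by omega)

lemma pvOnes_snoc (g : List (List Int)) (col a r : Int)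
    (h : pvOnes g col a (r - 1) = true) (hc : pvCell g r col = 1) (har : a ≤ r) :
    pvOnes g col a r = true := by
  rw [pvOnes_iff] at *
  intro i h1 h2
  rcases eq_or_lt_of_le h2 with rfl | hlt
  · exact hc
  · exact h i h1 (by omega)

lemma pvOnes_self (g : List (List Int)) (col r : Int) (hc : pvCell g r col = 1) :
    pvOnes g col r r = true := by
  rw [pvOnes_iff]
  intro i h1 h2
  rw [show i = r by omega]
  exact hc

lemma pvOnes_vac (g : List (List Int)) (col a b : Int) (h : b < a) :
    pvOnes g col a b = true := by
  rw [pvOnes_iff]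
  intro i h1 h2
  omega

lemma pvOnes_false (g : List (List Int)) (col a b i : Int)
    (h1 : a ≤ i) (h2 : i ≤ b) (hc : pvCell g i col ≠ 1) : pvOnes g col a b = false := by
  cases hob : pvOnes g col a b with
  | false => rfl
  | true => exact absurd ((pvOnes_iff g col a b).mp hob i h1 h2) hc

lemma headD_le (cur : List Int) (hpw : cur.Pairwise (· < ·)) :
    ∀ a ∈ cur, cur.headD (-1) ≤ a := by
  cases cur with
  | nil => intro a ha; cases ha
  | cons h t =>
    intro a ha
    rcases List.mem_cons.mp ha with rfl | ha
    · exact le_refl _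
    · exact le_of_lt ((List.pairwise_cons.mp hpw).1 a ha)

lemma pvPr_of_any (g : List (List Int)) (col : Int) (cur : List Int) (r x a : Int)
    (ha : a ∈ cur) (h1 : a ≤ x) (h2 : pvOnes g col a x = true) :
    pvPr g col cur r x = true := by
  rw [pvPr.eq_def, Bool.or_eq_true]
  exact Or.inl (List.any_eq_true.mpr ⟨a, ha, by simp [h1, h2]⟩)

lemma pvPr_of_head (g : List (List Int)) (col : Int) (cur : List Int) (r x h : Int)
    (t : List Int) (hcur : cur = h :: t) (hhr : h < r) (hxh : x ≤ h)
    (ho : pvOnes g col x h = true) : pvPr g col cur r x = true := by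
  subst hcur
  rw [pvPr.eq_def, Bool.or_eq_true]
  exact Or.inr (by simp [hhr, hxh, ho])

lemma pvPr_false (g : List (List Int)) (col : Int) (cur : List Int) (r x : Int)
    (hany : ∀ a ∈ cur, a ≤ x → pvOnes g col a x = false)
    (hhead : ∀ h t, cur = h :: t → h < r → x ≤ h → pvOnes g col x h = false) :
    pvPr g col cur r x = false := by
  rw [pvPr.eq_def]
  cases hcur : cur with
  | nil => simp
  | cons h t =>
    rw [Bool.or_eq_false_iff]
    constructor
    · rw [List.any_eq_false]
      intro a ha
      rw [Bool.not_eq_true, Bool.and_eq_false_iff]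
      by_cases hax : a ≤ x
      · exact Or.inr (hany a (hcur ▸ ha) hax)
      · exact Or.inl (by simp [hax])
    · by_cases hhr : h < r
      · by_cases hxh : x ≤ h
        · simp [hhead h t hcur hhr hxh]
        · simp [hxh]
      · simp [hhr]

lemma pvPr_succ_eq (g : List (List Int)) (col : Int) (cur : List Int) (r x : Int)
    (hx : ∀ h t, cur = h :: t → h = r → x ≤ r → pvOnes g col x r = false) :
    pvPr g col cur (r + 1) x = pvPr g col cur r x := by
  cases hcur : cur with
  | nil => rfl
  | cons h t =>
    simp only [pvPr]
    congr 1
    by_cases hhr : h < r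
    · simp [hhr, show h < r + 1 by omega]
    · by_cases hhr2 : h = r
      · subst hhr2
        by_cases hxr : x ≤ h
        · simp [hx h t hcur rfl hxr, hxr]
        · simp [hxr]
      · simp [show ¬(h < r + 1) by omega, show ¬(h < r) by omega]

lemma filter_range_succ (p q : Int → Bool) (r : Int) (hr : 0 ≤ r)
    (hpq : ∀ x, 0 ≤ x → x < r → q x = p x) :
    (PySem.List.pyRange 0 (r + 1) 1).filter q =
      (PySem.List.pyRange 0 r 1).filter p ++ (if q r then [r] else []) := by
  rw [PySem.List.pyRange_one_succ_right hr, List.filter_append]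
  congr 1
  · apply List.filter_congr
    intro x hx
    rcases PySem.List.mem_pyRange_one.mp hx with ⟨h1, h2⟩
    exact hpq x h1 h2
  · cases hq : q r <;> simp [hq]

lemma pvP_of_any (g : List (List Int)) (col : Int) (cur : List Int) (x a : Int)
    (ha : a ∈ cur) (h1 : a ≤ x) (h2 : pvOnes g col a x = true) :
    pvP g col cur x = true := by
  rw [pvP.eq_def, Bool.or_eq_true]
  exact Or.inl (List.any_eq_true.mpr ⟨a, ha, by simp [h1, h2]⟩)

lemma pvP_of_head (g : List (List Int)) (col : Int) (cur : List Int) (x h : Int)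
    (t : List Int) (hcur : cur = h :: t) (hxh : x ≤ h)
    (ho : pvOnes g col x h = true) : pvP g col cur x = true := by
  subst hcur
  rw [pvP.eq_def, Bool.or_eq_true]
  exact Or.inr (by simp [hxh, ho])

lemma cap_le (g : List (List Int)) (cur : List Int)
    (hbd : ∀ x ∈ cur, 0 ≤ x ∧ x < (g.length : Int)) (j : Int)
    (hj0 : 0 ≤ j) : pvCap g cur j ≤ (g.length : Int) := by
  rw [pvCap]
  split
  · exact le_of_lt (hbd _ (getD_mem cur (j + 1) (by omega) (by assumption))).2
  · exact le_refl _

lemma getD_nat (cur : List Int) (j : Nat) (hj : j < cur.length) :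
    PySem.List.pyGetD cur (j : Int) 0 = cur[j] := by
  rw [PySem.List.pyGetD_eq_getElem cur 0 (by positivity) (by exact_mod_cast hj)]
  simp

lemma reach (g : List (List Int)) (col : Int) (cur : List Int)
    (hpw : cur.Pairwise (· < ·))
    (_hbd : ∀ x ∈ cur, 0 ≤ x ∧ x < (g.length : Int)) (x : Int)
    (hxn : x < (g.length : Int)) :
    ∀ (k j : Nat), cur.length - j = k → ∀ (hj : j < cur.length), cur[j] ≤ x →
      pvOnes g col cur[j] x = true →
      x ∈ (PySem.List.pyRange 0 (cur.length : Int) 1).flatMap (pvSegS g col cur) := by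
  intro k
  induction k with
  | zero => intro j hk hj _ _; omega
  | succ n ih =>
    intro j hk hj hle hones
    have hcell : pvCell g cur[j] col = 1 :=
      (pvOnes_iff g col cur[j] x).mp hones cur[j] (le_refl _) hle
    by_cases hcap : x < pvCap g cur (j : Int)
    · apply List.mem_flatMap.mpr
      refine ⟨(j : Int), PySem.List.mem_pyRange_one.mpr ⟨by positivity, by exact_mod_cast hj⟩, ?_⟩
      simp only [pvSegS, getD_nat cur j hj]
      rw [if_pos hcell, List.append_assoc, List.mem_append, List.mem_append,
        List.mem_singleton]
      rcases eq_or_lt_of_le hle with heq | hlt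
      · exact Or.inr (Or.inl heq.symm)
      · refine Or.inr (Or.inr ((mem_downT' g col cur[j] (pvCap g cur (j : Int)) x).mpr
          ⟨hlt, hcap, fun i hi1 hi2 => (pvOnes_iff g col cur[j] x).mp hones i (by omega) hi2⟩))
    · have hj1 : j + 1 < cur.length := by
        by_contra hcon
        rw [pvCap, if_neg (by omega)] at hcap
        omega
      have hcapeq : pvCap g cur (j : Int) = cur[j + 1] := by
        rw [pvCap, if_pos (by omega)]
        rw [show (j : Int) + 1 = ((j + 1 : Nat) : Int) from by push_cast; ring]
        exact getD_nat cur (j + 1) hj1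
      have hmono : cur[j] < cur[j + 1] :=
        (List.pairwise_iff_getElem.mp hpw) j (j + 1) hj hj1 (by omega)
      exact ih (j + 1) (by omega) hj1 (by omega) (pvOnes_sub g col cur[j] x cur[j + 1] x hones
        (by omega) (le_refl _))

lemma mem_flat_iff (g : List (List Int)) (col : Int) (cur : List Int)
    (hpw : cur.Pairwise (· < ·))
    (hbd : ∀ x ∈ cur, 0 ≤ x ∧ x < (g.length : Int)) (x : Int) :
    x ∈ (PySem.List.pyRange 0 (cur.length : Int) 1).flatMap (pvSegS g col cur) ↔
      pvP g col cur x = true ∧ 0 ≤ x ∧ x < (g.length : Int) := by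
  constructor
  · intro hx
    rcases List.mem_flatMap.mp hx with ⟨j, hj, hxj⟩
    rcases PySem.List.mem_pyRange_one.mp hj with ⟨hj0, hjl⟩
    obtain ⟨hrow0, hrown⟩ := hbd _ (getD_mem cur j hj0 hjl)
    have hcapn : pvCap g cur j ≤ (g.length : Int) := cap_le g cur hbd j hj0
    simp only [pvSegS] at hxj
    split at hxj
    · rename_i hcell
      rw [List.append_assoc, List.mem_append, List.mem_append, List.mem_singleton] at hxj
      rcases hxj with hxj | hxj | hxj
      · by_cases hjz : j = 0
        · rw [if_pos hjz, List.mem_reverse, mem_upT' g col _ x hrow0] at hxj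
          obtain ⟨hx0, hxr, hall⟩ := hxj
          obtain ⟨h, t, hcur⟩ : ∃ h t, cur = h :: t :=
            List.exists_cons_of_ne_nil (fun he => by rw [he] at hjl; simp at hjl; omega)
          have hrh : PySem.List.pyGetD cur j 0 = h := by
            rw [hjz, hcur]; simp [pysem]
          rw [hrh] at hxr hall hcell hrown
          refine ⟨pvP_of_head g col cur x h t hcur (by omega) ?_, hx0, by omega⟩
          exact pvOnes_snoc g col x h
            ((pvOnes_iff g col x (h - 1)).mpr (fun i hi1 hi2 => hall i hi1 (by omega)))
            hcell (by omega)
        · rw [if_neg hjz] at hxj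
          cases hxj
      · subst hxj
        exact ⟨pvP_of_any g col cur _ _ (getD_mem cur j hj0 hjl) (le_refl _)
          (pvOnes_self g col _ hcell), hrow0, hrown⟩
      · rw [mem_downT'] at hxj
        obtain ⟨hrx, hxcap, hall⟩ := hxj
        refine ⟨pvP_of_any g col cur x _ (getD_mem cur j hj0 hjl) (by omega) ?_, by omega,
          by omega⟩
        rw [pvOnes_iff]
        intro i hi1 hi2
        rcases eq_or_lt_of_le hi1 with rfl | hlt
        · exact hcell
        · exact hall i hlt hi2
    · cases hxj
  · rintro ⟨hP, hx0, hxn⟩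
    rw [pvP.eq_def, Bool.or_eq_true] at hP
    rcases hP with hP | hP
    · rcases List.any_eq_true.mp hP with ⟨a, hamem, hconj⟩
      rw [Bool.and_eq_true, decide_eq_true_eq] at hconj
      obtain ⟨hax, hones⟩ := hconj
      obtain ⟨i, hi, hieq⟩ := List.getElem_of_mem hamem
      exact reach g col cur hpw hbd x hxn (cur.length - i) i rfl hi (by rw [hieq]; exact hax)
        (by rw [hieq]; exact hones)
    · obtain ⟨h, t, hcur⟩ : ∃ h t, cur = h :: t :=
        List.exists_cons_of_ne_nil (fun he => by rw [he] at hP; simp at hP)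
      rw [hcur] at hP
      rw [Bool.and_eq_true, decide_eq_true_eq] at hP
      obtain ⟨hxh, hones⟩ := hP
      have hlen : 0 < cur.length := by rw [hcur]; simp
      have hg0 : PySem.List.pyGetD cur 0 0 = h := by rw [hcur]; simp [pysem]
      have hh0 : cur[0]'hlen = h := by
        have := getD_nat cur 0 hlen
        rw [show ((0 : Nat) : Int) = (0 : Int) from rfl, hg0] at this
        exact this.symm
      rcases eq_or_lt_of_le hxh with heq | hlt
      · exact reach g col cur hpw hbd x hxn (cur.length - 0) 0 rfl hlen
          (by rw [hh0]; omega)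
          (by rw [hh0, ← heq]; exact pvOnes_sub g col x h x x hones (le_refl _) (by omega))
      · have hcell : pvCell g h col = 1 :=
          (pvOnes_iff g col x h).mp hones h hxh (le_refl _)
        apply List.mem_flatMap.mpr
        refine ⟨0, PySem.List.mem_pyRange_one.mpr ⟨le_refl _, by exact_mod_cast hlen⟩, ?_⟩
        simp only [pvSegS]
        rw [hg0, if_pos hcell, if_pos trivial, List.append_assoc, List.mem_append]
        refine Or.inl ?_
        rw [List.mem_reverse, mem_upT' g col h x (hbd h (by rw [hcur]; exact List.mem_cons_self)).1]
        exact ⟨hx0, hlt, fun i hi1 hi2 => (pvOnes_iff g col x h).mp hones i hi1 (by omega)⟩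
lemma scan_step (g : List (List Int)) (col : Int) (cur : List Int)
    (hpw : cur.Pairwise (· < ·))
    (hbd : ∀ x ∈ cur, 0 ≤ x ∧ x < (g.length : Int))
    (r : Int) (hr0 : 0 ≤ r) (_hrn : r < (g.length : Int))
    (st : List Int × List Int × Bool) (hinv : pvInv g col cur r st) :
    pvInv g col cur (r + 1)
      (if pvCell g r col = 1 then
        if st.2.2 then (st.1 ++ [r], st.2.1, st.2.2)
        else if PySem.Set.contains (PySem.Set.ofList cur) r then
          (if r = cur.headD (-1) then st.1 ++ st.2.1 ++ [r] else st.1 ++ [r], [], true)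
        else (st.1, st.2.1 ++ [r], st.2.2)
      else (st.1, [], false)) := by
  obtain ⟨nxt, pending, anch⟩ := st
  obtain ⟨h1, h2, h3⟩ := hinv
  dsimp only at h1 h2 h3
  by_cases hc : pvCell g r col = 1
  · rw [if_pos hc]
    cases anch with
    | true =>
      rw [if_pos rfl]
      obtain ⟨hpend, a, hamem, har, hones⟩ := h2 rfl
      have hstable : ∀ x, 0 ≤ x → x < r → pvPr g col cur (r + 1) x = pvPr g col cur r x := by
        intro x _ _
        apply pvPr_succ_eq
        intro h t hcur heq _
        have hha := headD_le cur hpw a hamem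
        rw [hcur, List.headD_cons] at hha
        omega
      refine ⟨?_, ?_, ?_⟩
      · show nxt ++ [r] = _
        rw [filter_range_succ (pvPr g col cur r) (pvPr g col cur (r + 1)) r hr0 hstable,
          ← h1, if_pos (pvPr_of_any g col cur (r + 1) r a hamem (by omega)
            (pvOnes_snoc g col a r hones hc (by omega)))]
      · intro _
        refine ⟨hpend, a, hamem, by omega, ?_⟩
        rw [show r + 1 - 1 = r from by ring]
        exact pvOnes_snoc g col a r hones hc (by omega)
      · intro h; exact absurd h (by simp)
    | false =>
      rw [if_neg Bool.false_ne_true]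
      obtain ⟨s, hs0, hsr, hpend, hones, hedge, hnoact⟩ := h3 rfl
      by_cases hact : r ∈ cur
      · rw [if_pos (by rw [PySem.Set.contains_iff, PySem.Set.mem_ofList]; exact hact)]
        by_cases hhead : r = cur.headD (-1)
        · rw [if_pos hhead]
          obtain ⟨t, hcur⟩ : ∃ t, cur = r :: t := by
            cases hcurc : cur with
            | nil => rw [hcurc] at hact; cases hact
            | cons h t =>
              refine ⟨t, ?_⟩
              rw [hcurc, List.headD_cons] at hhead
              rw [hhead]
          have hxfalse : ∀ x, 0 ≤ x → x < s → x ≤ r → pvOnes g col x r = false := by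
            intro x hx0 hxs hxr
            rcases hedge with rfl | hcell
            · omega
            · exact pvOnes_false g col x r (s - 1) (by omega) (by omega) hcell
          have hstable : ∀ x, 0 ≤ x → x < s → pvPr g col cur (r + 1) x = pvPr g col cur r x := by
            intro x hx0 hxs
            exact pvPr_succ_eq g col cur r x (fun h t _ heq hxr => hxfalse x hx0 hxs hxr)
          have hmidP : ∀ x ∈ PySem.List.pyRange s r 1, pvPr g col cur (r + 1) x = true := by
            intro x hx
            rcases PySem.List.mem_pyRange_one.mp hx with ⟨hx1, hx2⟩
            exact pvPr_of_head g col cur (r + 1) x r t hcur (by omega) (by omega)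
              (pvOnes_snoc g col x r (pvOnes_sub g col s (r - 1) x (r - 1) hones hx1 (le_refl _))
                hc (by omega))
          have hmidF : ∀ x ∈ PySem.List.pyRange s r 1, pvPr g col cur r x = false := by
            intro x hx
            rcases PySem.List.mem_pyRange_one.mp hx with ⟨hx1, hx2⟩
            apply pvPr_false
            · intro a hamem hax
              have ha0 := (hbd a hamem).1
              by_cases has : a < s
              · rcases hedge with rfl | hcell
                · omega
                · exact pvOnes_false g col a x (s - 1) (by omega) (by omega) hcell
              · exact absurd ⟨by omega, by omega⟩ (hnoact a hamem)
            · intro h t' hcur' hhr _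
              rw [hcur] at hcur'
              have : h = r := by injection hcur' with e _; omega
              omega
          refine ⟨?_, ?_, ?_⟩
          · show nxt ++ pending ++ [r] = _
            rw [PySem.List.pyRange_one_succ_right hr0, List.filter_append,
              PySem.List.pyRange_one_append 0 s r hs0 hsr, List.filter_append]
            have e1 : nxt = (PySem.List.pyRange 0 s 1).filter (pvPr g col cur (r + 1)) := by
              rw [h1, PySem.List.pyRange_one_append 0 s r hs0 hsr, List.filter_append,
                show (PySem.List.pyRange s r 1).filter (pvPr g col cur r) = [] from
                  List.filter_eq_nil_iff.mpr (fun x hx => by simp [hmidF x hx]),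
                List.append_nil]
              exact List.filter_congr (fun x hx => by
                rcases PySem.List.mem_pyRange_one.mp hx with ⟨hx1, hx2⟩
                exact (hstable x hx1 hx2).symm)
            have e2 : pending = (PySem.List.pyRange s r 1).filter (pvPr g col cur (r + 1)) := by
              rw [hpend]
              exact (List.filter_eq_self.mpr (fun x hx => hmidP x hx)).symm
            rw [← e1, ← e2,
              show (List.filter (pvPr g col cur (r + 1)) [r]) = [r] from by
                simp [pvPr_of_any g col cur (r + 1) r r hact (le_refl r) (pvOnes_self g col r hc)]]
          · intro _
            refine ⟨rfl, r, hact, by omega, ?_⟩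
            rw [show r + 1 - 1 = r from by ring]
            exact pvOnes_self g col r hc
          · intro h; exact absurd h (by simp)
        · rw [if_neg hhead]
          have hstable : ∀ x, 0 ≤ x → x < r → pvPr g col cur (r + 1) x = pvPr g col cur r x := by
            intro x _ _
            apply pvPr_succ_eq
            intro h t hcur heq _
            exact absurd (by rw [hcur, List.headD_cons, heq]) hhead
          refine ⟨?_, ?_, ?_⟩
          · show nxt ++ [r] = _
            rw [filter_range_succ (pvPr g col cur r) (pvPr g col cur (r + 1)) r hr0 hstable,
              ← h1, if_pos (pvPr_of_any g col cur (r + 1) r r hact (le_refl r)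
                (pvOnes_self g col r hc))]
          · intro _
            refine ⟨rfl, r, hact, by omega, ?_⟩
            rw [show r + 1 - 1 = r from by ring]
            exact pvOnes_self g col r hc
          · intro h; exact absurd h (by simp)
      · rw [if_neg (by rw [PySem.Set.contains_iff, PySem.Set.mem_ofList]; exact hact)]
        have hstable : ∀ x, 0 ≤ x → x < r → pvPr g col cur (r + 1) x = pvPr g col cur r x := by
          intro x _ _
          apply pvPr_succ_eq
          intro h t hcur heq _
          have : h ∈ cur := by rw [hcur]; exact List.mem_cons_self
          rw [heq] at this
          exact absurd this hact
        have hrF : pvPr g col cur (r + 1) r = false := by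
          apply pvPr_false
          · intro a hamem hax
            have ha0 := (hbd a hamem).1
            by_cases has : a < s
            · rcases hedge with rfl | hcell
              · omega
              · exact pvOnes_false g col a r (s - 1) (by omega) (by omega) hcell
            · have : a ≠ r := fun h => hact (h ▸ hamem)
              exact absurd ⟨by omega, by omega⟩ (hnoact a hamem)
          · intro h t hcur hhr hrh
            exfalso
            have hh : h ∈ cur := by rw [hcur]; exact List.mem_cons_self
            rw [show h = r from by omega] at hh
            exact hact hh
        refine ⟨?_, ?_, ?_⟩
        · show nxt = _
          rw [filter_range_succ (pvPr g col cur r) (pvPr g col cur (r + 1)) r hr0 hstable,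
            ← h1, hrF]
          simp
        · intro h; exact absurd h (by simp)
        · intro _
          refine ⟨s, hs0, by omega, ?_, ?_, hedge, ?_⟩
          · show pending ++ [r] = _
            rw [hpend, PySem.List.pyRange_one_succ_right (by omega)]
          · rw [show r + 1 - 1 = r from by ring]
            exact pvOnes_snoc g col s r hones hc (by omega)
          · intro a hamem ⟨has, har1⟩
            by_cases haa : a = r
            · exact hact (haa ▸ hamem)
            · exact hnoact a hamem ⟨has, by omega⟩
  · rw [if_neg hc]
    have hstable : ∀ x, 0 ≤ x → x < r → pvPr g col cur (r + 1) x = pvPr g col cur r x := by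
      intro x _ _
      apply pvPr_succ_eq
      intro h t hcur heq hxr
      exact pvOnes_false g col x r r hxr (le_refl r) hc
    have hrF : pvPr g col cur (r + 1) r = false := by
      apply pvPr_false
      · intro a hamem hax
        exact pvOnes_false g col a r r hax (le_refl r) hc
      · intro h t hcur hhr hrh
        exact pvOnes_false g col r h r (le_refl r) hrh hc
    refine ⟨?_, ?_, ?_⟩
    · show nxt = _
      rw [filter_range_succ (pvPr g col cur r) (pvPr g col cur (r + 1)) r hr0 hstable,
        ← h1, hrF]
      simp
    · intro h; exact absurd h (by simp)
    · intro _
      refine ⟨r + 1, by omega, le_refl _, ?_, pvOnes_vac g col (r + 1) (r + 1 - 1) (by omega), ?_, ?_⟩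
      · rw [PySem.List.pyRange_one_eq_nil (le_refl (r + 1))]
      · refine Or.inr ?_
        rw [show r + 1 - 1 = r from by ring]
        exact hc
      · intro a _ h; omega

lemma scanB_eq_canon (g : List (List Int)) (col : Int) (cur : List Int)
    (hpw : cur.Pairwise (· < ·))
    (hbd : ∀ x ∈ cur, 0 ≤ x ∧ x < (g.length : Int)) :
    pvScanB g col cur = pvCanon g col cur := by
  have hloop : ∀ r : Nat, (r : Int) ≤ (g.length : Int) →
      pvInv g col cur (r : Int)
        ((PySem.List.pyRange 0 (r : Int) 1).foldl
          (fun (st : List Int × List Int × Bool) r =>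
            if pvCell g r col = 1 then
              if st.2.2 then (st.1 ++ [r], st.2.1, st.2.2)
              else if PySem.Set.contains (PySem.Set.ofList cur) r then
                (if r = cur.headD (-1) then st.1 ++ st.2.1 ++ [r] else st.1 ++ [r], [], true)
              else (st.1, st.2.1 ++ [r], st.2.2)
            else (st.1, [], false)) ([], [], false)) := by
    intro r
    induction r with
    | zero =>
      intro _
      rw [show ((0 : Nat) : Int) = 0 from rfl, PySem.List.pyRange_one_eq_nil (le_refl 0),
        List.foldl_nil]
      refine ⟨?_, ?_, ?_⟩
      · rw [PySem.List.pyRange_one_eq_nil (le_refl 0)]; rfl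
      · intro h; simp at h
      · intro _
        refine ⟨0, le_refl 0, le_refl 0, ?_, ?_, Or.inl rfl, ?_⟩
        · rw [PySem.List.pyRange_one_eq_nil (le_refl 0)]
        · rw [pvOnes, PySem.List.pyRange_one_eq_nil (by omega)]; rfl
        · intro a _ h; omega
    | succ k ih =>
      intro hle
      rw [show ((k + 1 : Nat) : Int) = (k : Int) + 1 from by push_cast; ring,
        PySem.List.pyRange_one_succ_right (by positivity), List.foldl_append, List.foldl_cons,
        List.foldl_nil]
      exact scan_step g col cur hpw hbd (k : Int) (by positivity) (by push_cast at hle ⊢; omega)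
        _ (ih (by push_cast at hle ⊢; omega))
  have hfin := (hloop g.length (le_refl _)).1
  show _ = pvCanon g col cur
  simp only [pvScanB]
  rw [hfin, pvCanon]
  apply List.filter_congr
  intro x hx
  rw [pvPr.eq_def, pvP.eq_def]
  cases hcur : cur with
  | nil => rfl
  | cons h t =>
    have hh : h < (g.length : Int) := (hbd h (by rw [hcur]; exact List.mem_cons_self)).2
    simp [hh]

lemma step_eq (g : List (List Int)) (col : Int) (cur : List Int)
    (hpw : cur.Pairwise (· < ·))
    (hbd : ∀ x ∈ cur, 0 ≤ x ∧ x < (g.length : Int)) :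
    PySem.List.sorted (pvStepA g col cur) (fun x => x) false = pvScanB g col cur ∧
      (pvScanB g col cur).Pairwise (· < ·) ∧
      ∀ x ∈ pvScanB g col cur, 0 ≤ x ∧ x < (g.length : Int) := by
  have hcanon_pw : (pvCanon g col cur).Pairwise (· < ·) :=
    (PySem.List.pairwise_lt_pyRange_one _ _).filter _
  have hflat_pw : ((PySem.List.pyRange 0 (cur.length : Int) 1).flatMap
      (pvSegS g col cur)).Pairwise (· < ·) := by
    apply pairwise_flatMap_of
    · intro j hj
      rcases PySem.List.mem_pyRange_one.mp hj with ⟨hj0, hjl⟩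
      exact pairwise_segS g col cur j (hbd _ (getD_mem cur j hj0 hjl)).1
    · apply (PySem.List.pairwise_lt_pyRange_one _ _).imp_of_mem
      intro a b ha hb hab x hx y hy
      rcases PySem.List.mem_pyRange_one.mp ha with ⟨ha0, hal⟩
      rcases PySem.List.mem_pyRange_one.mp hb with ⟨hb0, hbl⟩
      obtain ⟨_, hxcap, _⟩ := mem_segS g col cur hpw hbd a ha0 hal x hx
      obtain ⟨_, _, hyge⟩ := mem_segS g col cur hpw hbd b hb0 hbl y hy
      have hcapa : pvCap g cur a = PySem.List.pyGetD cur (a + 1) 0 := by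
        rw [pvCap, if_pos (by omega)]
      have hyge' := hyge (by omega)
      have hmono : PySem.List.pyGetD cur (a + 1) 0 ≤ PySem.List.pyGetD cur b 0 := by
        rcases eq_or_lt_of_le (show a + 1 ≤ b by omega) with h | h
        · rw [h]
        · exact le_of_lt (getD_lt cur hpw (a + 1) b (by omega) h hbl)
      rw [hcapa] at hxcap
      omega
  have hflat_eq : (PySem.List.pyRange 0 (cur.length : Int) 1).flatMap (pvSegS g col cur) =
      pvCanon g col cur := by
    apply eq_of_pairwise_lt_of_mem_iff _ _ hflat_pw hcanon_pw
    intro x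
    rw [mem_flat_iff g col cur hpw hbd x, pvCanon, List.mem_filter,
      PySem.List.mem_pyRange_one]
    tauto
  have hscan := scanB_eq_canon g col cur hpw hbd
  refine ⟨?_, ?_, ?_⟩
  · rw [hscan, ← hflat_eq, stepA_eq_flatMap]
    apply PySem.List.sorted_eq_of_perm_of_pairwise_lt
    · exact List.Perm.flatMap_left _ (fun j hj => segA_perm_segS g col cur j)
    · exact hflat_pw
  · rw [hscan]; exact hcanon_pw
  · rw [hscan]
    intro x hx
    rcases List.mem_filter.mp hx with ⟨hx1, _⟩
    exact PySem.List.mem_pyRange_one.mp hx1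

lemma fold_cols_eq (g : List (List Int)) (cols : List Int) :
    ∀ cur : List Int, cur.Pairwise (· < ·) →
      (∀ x ∈ cur, 0 ≤ x ∧ x < (g.length : Int)) →
      cols.foldl (fun cur col => PySem.List.sorted (pvStepA g col cur) (fun x => x) false) cur =
        cols.foldl (fun cur col => pvScanB g col cur) cur := by
  induction cols with
  | nil => intro cur _ _; rfl
  | cons c t ih =>
    intro cur hpw hbd
    obtain ⟨heq, hpw', hbd'⟩ := step_eq g c cur hpw hbd
    rw [List.foldl_cons, List.foldl_cons, heq]
    exact ih _ hpw' hbd'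

-- ===== VERDICT (by name: the statement is the Claim_ definition above) =====
theorem backbone_endpoints_horizontal_py_spec : Claim_equal_backbone_endpoints_horizontal_py := by
  intro g _ _
  unfold Spec_backbone_endpoints_horizontal_py
  unfold backbone_endpoints_horizontal_py backbone_endpoints_horizontal_py_alt
  simp only
  apply fold_cols_eq
  · exact (PySem.List.pairwise_lt_pyRange_one _ _).filter _
  · intro x hx
    rcases List.mem_filter.mp hx with ⟨hx1, _⟩
    exact PySem.List.mem_pyRange_one.mp hx1
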